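-- pv_equiv track=rewrite | github.com/k1eu/Python-2020 | level1/p8/zadania_a.py | wynik
-- ===== SOURCE A (Python) =====
-- def wynik(a,b):
--     if b == 0 or a == b or b < a:
--         return 0
--     index = 0
--     roznica = b - a
--
--     while a != b:
--         if a*2 <= b and a != 0:
--             a *= 2
--             index += 1
--         else:
--             a += 1
--             index += 1
--     return index
-- ===== SOURCE B (Python) =====
-- def wynik(a, b):
--     if b <= a or b == 0:
--         return 0
--     extra = 0
--     if a == 0:
--         a = 1
--         extra = 1
--     k = (b // a).bit_length() - 1
--     return extra + k + (b - (a << k))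
-- ===== Notes on version B (the rewrite author's own statement) =====
-- stated objective: faster
-- what changed: Replaced the step-by-step doubling/increment loop by a closed form: the number of doublings is bit_length(b//a)-1 and the remaining steps are b - (a << k), computed in O(1) big-int operations instead of O(b-a) loop iterations.
-- outside the precondition, e.g. on wynik(-1, 1): A does not finish within the time limit, B returns 2
import Mathlib
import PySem

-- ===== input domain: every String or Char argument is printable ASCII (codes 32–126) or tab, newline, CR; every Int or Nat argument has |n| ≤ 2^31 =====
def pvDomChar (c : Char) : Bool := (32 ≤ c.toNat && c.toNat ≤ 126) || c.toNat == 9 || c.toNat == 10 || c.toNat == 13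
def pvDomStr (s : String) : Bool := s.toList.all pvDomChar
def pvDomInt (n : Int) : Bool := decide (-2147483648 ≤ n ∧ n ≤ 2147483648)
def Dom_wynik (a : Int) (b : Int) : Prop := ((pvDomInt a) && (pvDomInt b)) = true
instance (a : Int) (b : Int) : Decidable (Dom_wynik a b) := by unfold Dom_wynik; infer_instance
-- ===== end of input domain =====

-- B replaces A's O(b-a) doubling/increment loop by a closed form (k = bit_length(b//a)-1 doublings, then b - a·2^k increments); objective: faster.

-- ===== PORT A =====
-- A's while-loop; fuel (b-a).toNat+1 suffices because a strictly increases each iteration when a ≥ 0.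
def wynikLoop (fuel : Nat) (a b index : Int) : Int :=
  match fuel with
  | 0 => index
  | f + 1 =>
    if a = b then index
    else if a * 2 ≤ b ∧ a ≠ 0 then wynikLoop f (a * 2) b (index + 1)
    else wynikLoop f (a + 1) b (index + 1)

def wynik (a : Int) (b : Int) : Int :=
  if b = 0 ∨ a = b ∨ b < a then 0
  else wynikLoop ((b - a).toNat + 1) a b 0

-- ===== PORT B =====
def wynik_alt (a : Int) (b : Int) : Int :=
  if b ≤ a ∨ b = 0 then 0
  else
    let p : Int × Int := if a = 0 then (1, 1) else (a, 0)
    let k : Int := (PySem.Int.bitLength (PySem.Int.floordiv b p.1) : Int) - 1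
    p.2 + k + (b - p.1 * 2 ^ k.toNat)

-- ===== PRECONDITION & SPEC =====
-- Pre_ excludes a < 0 with a < b and b ≠ 0: there A's loop keeps doubling a negative a and never terminates.
def Pre_wynik (a : Int) (b : Int) : Prop := 0 ≤ a ∨ b ≤ a ∨ b = 0
instance (a : Int) (b : Int) : Decidable (Pre_wynik a b) := by unfold Pre_wynik; infer_instance
def pvWitness_wynik : Int × Int := (3, 25)

def Spec_wynik (a : Int) (b : Int) (out : Int) : Prop := out = wynik_alt a b
instance (a : Int) (b : Int) (out : Int) : Decidable (Spec_wynik a b out) := by unfold Spec_wynik; infer_instance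

-- ===== CLAIM (what is proved, stated in full; the proofs are below) =====
def Claim_equal_wynik : Prop := ∀ (a : Int) (b : Int), Dom_wynik a b → Pre_wynik a b → Spec_wynik a b (wynik a b)

-- ===== LEMMAS AND PROOFS =====

-- number of greedy steps from a to b, closed form over Nats
def phi (a b : Int) : Int :=
  ((PySem.Int.bitLength ((b.toNat / a.toNat : Nat) : Int) : Int) - 1)
    + (b - a * 2 ^ (PySem.Int.bitLength ((b.toNat / a.toNat : Nat) : Int) - 1))

lemma bitLength_one : PySem.Int.bitLength (1 : Int) = 1 := by decide

lemma bitLength_pos (m : Nat) (hm : 0 < m) : 1 ≤ PySem.Int.bitLength (m : Int) := by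
  have := PySem.Int.bitLength_natCast hm; omega

lemma loop_eq (fuel : Nat) : ∀ a b idx : Int, 0 < a → a ≤ b → (b - a).toNat < fuel →
    wynikLoop fuel a b idx = idx + phi a b := by
  induction fuel with
  | zero => intro a b idx _ _ h; omega
  | succ f ih =>
    intro a b idx ha hab hfuel
    by_cases heq : a = b
    · subst heq
      have hq : a.toNat / a.toNat = 1 := Nat.div_self (by omega)
      simp [wynikLoop, phi, hq, bitLength_one]
    · have hlt : a < b := lt_of_le_of_ne hab heq
      by_cases hd : a * 2 ≤ b
      · -- doubling step
        have step : wynikLoop (f + 1) a b idx = wynikLoop f (a * 2) b (idx + 1) := by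
          simp [wynikLoop, heq, hd]
          omega
        rw [step, ih (a * 2) b (idx + 1) (by omega) (by omega) (by omega)]
        -- phi a b = 1 + phi (a*2) b
        have hA : 0 < a.toNat := by omega
        have hq2 : 2 ≤ b.toNat / a.toNat := by
          rw [Nat.le_div_iff_mul_le hA]; omega
        have h2a : (a * 2).toNat = a.toNat * 2 := by omega
        have hdd : b.toNat / (a * 2).toNat = b.toNat / a.toNat / 2 := by
          rw [h2a, Nat.div_div_eq_div_mul]
        have hbl : PySem.Int.bitLength ((b.toNat / a.toNat : Nat) : Int)
            = PySem.Int.bitLength ((b.toNat / a.toNat / 2 : Nat) : Int) + 1 :=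
          PySem.Int.bitLength_natCast (by omega)
        have hbl2 : 1 ≤ PySem.Int.bitLength ((b.toNat / a.toNat / 2 : Nat) : Int) :=
          bitLength_pos _ (by omega)
        unfold phi
        rw [hdd, hbl]
        set m := PySem.Int.bitLength ((b.toNat / a.toNat / 2 : Nat) : Int) with hm
        have hpow : a * 2 ^ (m + 1 - 1) = a * 2 * 2 ^ (m - 1) := by
          have : m + 1 - 1 = (m - 1) + 1 := by omega
          rw [this, pow_succ]; ring
        rw [hpow]
        push_cast
        ring_nf
      · -- increment step
        have step : wynikLoop (f + 1) a b idx = wynikLoop f (a + 1) b (idx + 1) := by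
          have : ¬ (a * 2 ≤ b ∧ a ≠ 0) := by tauto
          simp [wynikLoop, heq, this]
        rw [step]
        have key : ∀ x : Int, 0 < x → x ≤ b → b < x * 2 → phi x b = b - x := by
          intro x hx hxb hbx
          have hq1 : b.toNat / x.toNat = 1 :=
            Nat.div_eq_of_lt_le (by omega) (by omega)
          simp [phi, hq1, bitLength_one]
        have hinc : wynikLoop f (a + 1) b (idx + 1) = idx + 1 + phi (a + 1) b :=
          ih (a + 1) b (idx + 1) (by omega) (by omega) (by omega)
        rw [hinc, key a ha hab (by omega)]
        by_cases hb1 : a + 1 = b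
        · rw [hb1, key b (by omega) le_rfl (by omega)]; omega
        · rw [key (a + 1) (by omega) (by omega) (by omega)]; ring

-- connect B's expression to phi for 0 < a ≤ b
lemma alt_phi (a b : Int) (ha : 0 < a) (hab : a < b) (hb : ¬ (b ≤ a ∨ b = 0)) :
    wynik_alt a b = phi a b := by
  have hfd : PySem.Int.floordiv b a = ((b.toNat / a.toNat : Nat) : Int) := by
    have h1 : PySem.Int.floordiv b a = PySem.Int.floordiv ((b.toNat : Nat) : Int) ((a.toNat : Nat) : Int) := by
      congr 1 <;> omega
    rw [h1, PySem.Int.floordiv_natCast]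
  have ha0 : a ≠ 0 := by omega
  have h1 : 1 ≤ PySem.Int.bitLength ((b.toNat / a.toNat : Nat) : Int) :=
    bitLength_pos _ (Nat.div_pos (by omega) (by omega))
  simp only [wynik_alt, hb, if_false, ha0, if_false, hfd]
  unfold phi
  have ht : (((PySem.Int.bitLength ((b.toNat / a.toNat : Nat) : Int) : Int) - 1)).toNat
      = PySem.Int.bitLength ((b.toNat / a.toNat : Nat) : Int) - 1 := by omega
  rw [ht]
  ring

-- ===== VERDICT (by name: the statement is the Claim_ definition above) =====
theorem wynik_spec : Claim_equal_wynik := by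
  intro a b _ hpre
  unfold Spec_wynik
  by_cases h0 : b = 0 ∨ a = b ∨ b < a
  · have hA : wynik a b = 0 := by simp [wynik, h0]
    have hB : wynik_alt a b = 0 := by
      have : b ≤ a ∨ b = 0 := by omega
      simp [wynik_alt, this]
    rw [hA, hB]
  · push Not at h0
    obtain ⟨hb0, hne, hle⟩ := h0
    have hab : a < b := lt_of_le_of_ne (by omega) hne
    have ha : 0 ≤ a := by
      rcases hpre with h | h | h <;> omega
    have hA : wynik a b = wynikLoop ((b - a).toNat + 1) a b 0 := by
      simp [wynik, hb0, hne, not_lt.mpr hle]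
    have hBg : ¬ (b ≤ a ∨ b = 0) := by omega
    by_cases haz : a = 0
    · subst haz
      have hstep : wynikLoop ((b - 0).toNat + 1) 0 b 0 = wynikLoop (b - 0).toNat 1 b 1 := by
        have hne' : (0 : Int) ≠ b := by omega
        simp [wynikLoop, hne']
      rw [hA, hstep]
      by_cases hb1 : b = 1
      · subst hb1
        decide
      · have hloop : wynikLoop (b - 0).toNat 1 b 1 = 1 + phi 1 b := by
          apply loop_eq <;> omega
        rw [hloop]
        have hfd : PySem.Int.floordiv b 1 = ((b.toNat / 1 : Nat) : Int) := by
          have h1 : PySem.Int.floordiv b 1 = PySem.Int.floordiv ((b.toNat : Nat) : Int) ((1 : Nat) : Int) := by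
            congr 1; omega
          rw [h1, PySem.Int.floordiv_natCast]
        have h1 : 1 ≤ PySem.Int.bitLength ((b.toNat / 1 : Nat) : Int) :=
          bitLength_pos _ (by omega)
        simp only [wynik_alt, hBg, if_false, if_true, hfd]
        unfold phi
        have hq : b.toNat / (1 : Int).toNat = b.toNat / 1 := by norm_num
        rw [hq]
        have ht : (((PySem.Int.bitLength ((b.toNat / 1 : Nat) : Int) : Int) - 1)).toNat
            = PySem.Int.bitLength ((b.toNat / 1 : Nat) : Int) - 1 := by omega
        rw [ht]
        ring
    · have ha' : 0 < a := by omega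
      rw [hA, loop_eq _ a b 0 ha' (by omega) (by omega), alt_phi a b ha' hab hBg]
      ring
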